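-- pv_equiv track=rewrite | github.com/EvgeniiGuskov/geek_bot | src/service/mustwatch_service.py | __clear_watches_id_list_from_watches_for_all_users
-- ===== SOURCE A (Python) =====
-- from typing import Tuple, Dict, List
--
-- def __clear_watches_id_list_from_watches_for_all_users(
--                                                        chosen_user_tuple: Tuple[int],
--                                                        same_group_watches_id_list: List[int]) -> List[int]:
--     same_group_users_amount = len(chosen_user_tuple)
--     watches_id_list = []
--     for watch in same_group_watches_id_list:
--         if same_group_watches_id_list.count(watch) < same_group_users_amount:
--             watches_id_list.append(watch)
--     return list(set(watches_id_list))
-- ===== SOURCE B (Python) =====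
-- def __clear_watches_id_list_from_watches_for_all_users(
--                                                        chosen_user_tuple,
--                                                        same_group_watches_id_list):
--     k = len(chosen_user_tuple)
--     s = sorted(same_group_watches_id_list)
--     kept = set()
--     i = 0
--     n = len(s)
--     while i < n:
--         j = i + 1
--         while j < n and s[j] == s[i]:
--             j += 1
--         if j - i < k:
--             kept.add(s[i])
--         i = j
--     return list(set(w for w in same_group_watches_id_list if w in kept))
-- ===== Notes on version B (the rewrite author's own statement) =====
-- stated objective: faster
-- what changed: A repeatedly scans the whole list with .count() for every element and dedups with set() at the end; B sorts the list once and scans consecutive runs to collect the values whose run length is below the user count, then keeps the occurrences belonging to that set.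
import Mathlib
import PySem

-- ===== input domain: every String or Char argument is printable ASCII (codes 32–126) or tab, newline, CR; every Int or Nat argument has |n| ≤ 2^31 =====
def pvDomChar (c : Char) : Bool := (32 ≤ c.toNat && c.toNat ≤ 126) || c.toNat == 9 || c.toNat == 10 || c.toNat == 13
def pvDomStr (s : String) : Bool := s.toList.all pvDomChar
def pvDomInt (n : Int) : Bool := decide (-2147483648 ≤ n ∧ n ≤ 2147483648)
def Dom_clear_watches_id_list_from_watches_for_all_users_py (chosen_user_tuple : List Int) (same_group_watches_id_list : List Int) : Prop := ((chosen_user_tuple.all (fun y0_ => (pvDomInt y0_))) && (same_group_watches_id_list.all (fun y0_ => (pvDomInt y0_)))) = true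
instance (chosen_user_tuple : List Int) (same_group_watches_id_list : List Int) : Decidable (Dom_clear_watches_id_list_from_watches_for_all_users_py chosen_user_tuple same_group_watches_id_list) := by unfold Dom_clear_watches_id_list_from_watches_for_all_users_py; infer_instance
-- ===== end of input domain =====

-- B replaces A's quadratic per-element .count() scan by a sort-then-run-length scan: sort once,
-- walk consecutive runs collecting the values whose run length < len(chosen_user_tuple), then
-- keep the matching occurrences of the original list (same elements, same set-insertion order as A).

-- ===== PORT A =====
def clear_watches_id_list_from_watches_for_all_users_py (chosen_user_tuple : List Int) (same_group_watches_id_list : List Int) : List Int :=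
  let same_group_users_amount : Int := chosen_user_tuple.length
  let watches_id_list : List Int :=
    same_group_watches_id_list.foldl
      (fun acc watch =>
        if (PySem.List.count same_group_watches_id_list watch : Int) < same_group_users_amount
        then acc ++ [watch] else acc) []
  PySem.Set.ofList watches_id_list

-- ===== PORT B =====
-- Source B's while loop over the sorted list: each step consumes one whole run s[i..j) of equal
-- values and keeps its value when the run is shorter than k (kept is only used for membership)
def keptRuns (k : Int) : List Int → List Int
  | [] => []
  | h :: t =>
    let run : Int := 1 + (t.takeWhile (fun x => x == h)).length
    let rest := t.dropWhile (fun x => x == h)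
    if run < k then h :: keptRuns k rest else keptRuns k rest
termination_by s => s.length
decreasing_by
  all_goals simpa using Nat.lt_succ_of_le (List.length_dropWhile_le _ _)

def clear_watches_id_list_from_watches_for_all_users_py_alt (chosen_user_tuple : List Int) (same_group_watches_id_list : List Int) : List Int :=
  let k : Int := chosen_user_tuple.length
  let s := PySem.List.sorted same_group_watches_id_list (fun x => x) false
  let kept := keptRuns k s
  PySem.Set.ofList (same_group_watches_id_list.filter (fun w => kept.contains w))

-- ===== PRECONDITION & SPEC =====
def Spec_clear_watches_id_list_from_watches_for_all_users_py (chosen_user_tuple : List Int) (same_group_watches_id_list : List Int) (out : List Int) : Prop := out = clear_watches_id_list_from_watches_for_all_users_py_alt chosen_user_tuple same_group_watches_id_list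
instance (chosen_user_tuple : List Int) (same_group_watches_id_list : List Int) (out : List Int) : Decidable (Spec_clear_watches_id_list_from_watches_for_all_users_py chosen_user_tuple same_group_watches_id_list out) := by unfold Spec_clear_watches_id_list_from_watches_for_all_users_py; infer_instance

-- ===== CLAIM =====
def Claim_equal_clear_watches_id_list_from_watches_for_all_users_py : Prop := ∀ (chosen_user_tuple : List Int) (same_group_watches_id_list : List Int), Dom_clear_watches_id_list_from_watches_for_all_users_py chosen_user_tuple same_group_watches_id_list → Spec_clear_watches_id_list_from_watches_for_all_users_py chosen_user_tuple same_group_watches_id_list (clear_watches_id_list_from_watches_for_all_users_py chosen_user_tuple same_group_watches_id_list)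

-- ===== LEMMAS AND PROOFS =====
theorem dropWhile_head_false {α : Type} (p : α → Bool) (l : List α) (x : α) (xs : List α)
    (h : l.dropWhile p = x :: xs) : p x = false := by
  induction l with
  | nil => simp at h
  | cons a l ih =>
    by_cases hp : p a = true
    · exact ih (by simpa [List.dropWhile, hp] using h)
    · simp [List.dropWhile, hp] at h
      simp [← h.1]; simpa using hp

theorem keptRuns_cons_iff (k h : Int) (t : List Int)
    (hs : (h :: t).Pairwise (· ≤ ·))
    (ih : ∀ w, w ∈ keptRuns k (t.dropWhile (fun x => x == h)) ↔
        w ∈ t.dropWhile (fun x => x == h) ∧ (((t.dropWhile (fun x => x == h)).count w : Int) < k))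
    (w : Int) :
    w ∈ keptRuns k (h :: t) ↔ w ∈ h :: t ∧ (((h :: t).count w : Int) < k) := by
  have ht : t.takeWhile (fun x => x == h) ++ t.dropWhile (fun x => x == h) = t :=
    List.takeWhile_append_dropWhile
  have htw : ∀ x ∈ t.takeWhile (fun x => x == h), x = h := by
    intro x hx; simpa using List.mem_takeWhile_imp hx
  have hdw_pw : (t.dropWhile (fun x => x == h)).Pairwise (· ≤ ·) :=
    List.Pairwise.sublist (List.dropWhile_sublist _) (List.pairwise_cons.mp hs).2
  have hnotin : h ∉ t.dropWhile (fun x => x == h) := by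
    cases hdw : t.dropWhile (fun x => x == h) with
    | nil => simp
    | cons d ds =>
      have hd : (d == h) = false := dropWhile_head_false _ t d ds hdw
      have hdt : d ∈ t := (List.dropWhile_sublist _).subset (hdw ▸ List.mem_cons_self)
      have hhd : h < d :=
        lt_of_le_of_ne ((List.pairwise_cons.mp hs).1 d hdt)
          (by intro he; rw [← he] at hd; simp at hd)
      intro hmem
      rcases List.mem_cons.mp hmem with rfl | hmem'
      · simp at hd
      · exact absurd ((List.pairwise_cons.mp (hdw ▸ hdw_pw)).1 h hmem') (not_le.mpr hhd)
  have hct : ∀ v, t.count v = (t.takeWhile (fun x => x == h)).count v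
      + (t.dropWhile (fun x => x == h)).count v := by
    intro v; conv_lhs => rw [← ht]
    exact List.count_append ..
  have hunfold : keptRuns k (h :: t) =
      if (1 + ((t.takeWhile (fun x => x == h)).length : Int)) < k
      then h :: keptRuns k (t.dropWhile (fun x => x == h))
      else keptRuns k (t.dropWhile (fun x => x == h)) := by
    rw [keptRuns]
  by_cases hw : w = h
  · subst hw
    have htwc : (t.takeWhile (fun x => x == w)).count w = (t.takeWhile (fun x => x == w)).length :=
      List.count_eq_length.mpr (fun b hb => by simp [htw b hb])
    have hdwc : (t.dropWhile (fun x => x == w)).count w = 0 :=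
      List.count_eq_zero.mpr hnotin
    have hcnt : (w :: t).count w = (t.takeWhile (fun x => x == w)).length + 1 := by
      simp [hct w, htwc, hdwc]
    rw [hunfold, hcnt]
    by_cases hc : (1 + ((t.takeWhile (fun x => x == w)).length : Int)) < k
    · simp only [if_pos hc]
      constructor
      · intro _; exact ⟨List.mem_cons_self, by push_cast; omega⟩
      · intro _; exact List.mem_cons_self
    · simp only [if_neg hc]
      rw [ih w]
      constructor
      · intro hmem; exact absurd hmem.1 hnotin
      · intro hmem; exfalso; apply hc; have := hmem.2; push_cast at this ⊢; omega
  · have htwc : (t.takeWhile (fun x => x == h)).count w = 0 :=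
      List.count_eq_zero.mpr (fun hm => hw (htw w hm))
    have hmemtw : w ∉ t.takeWhile (fun x => x == h) := fun hm => hw (htw w hm)
    have hw' : h ≠ w := Ne.symm hw
    have hcnt : (h :: t).count w = (t.dropWhile (fun x => x == h)).count w := by
      simp [hw', hct w, htwc]
    have hmem : w ∈ h :: t ↔ w ∈ t.dropWhile (fun x => x == h) := by
      rw [List.mem_cons]
      constructor
      · rintro (rfl | hm)
        · exact absurd rfl hw
        · rcases (by rw [← ht] at hm; exact List.mem_append.mp hm) with hm' | hm'
          · exact absurd hm' hmemtw
          · exact hm'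
      · intro hm; exact Or.inr ((List.dropWhile_sublist _).subset hm)
    rw [hunfold, hcnt]
    constructor
    · intro hmem'
      have hmem'' : w ∈ keptRuns k (t.dropWhile (fun x => x == h)) := by
        by_cases hc : (1 + ((t.takeWhile (fun x => x == h)).length : Int)) < k
        · rw [if_pos hc] at hmem'
          rcases List.mem_cons.mp hmem' with rfl | hm
          · exact absurd rfl hw
          · exact hm
        · rwa [if_neg hc] at hmem'
      rcases (ih w).mp hmem'' with ⟨h1, h2⟩
      exact ⟨hmem.mpr h1, h2⟩
    · rintro ⟨h1, h2⟩
      have : w ∈ keptRuns k (t.dropWhile (fun x => x == h)) :=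
        (ih w).mpr ⟨hmem.mp h1, h2⟩
      by_cases hc : (1 + ((t.takeWhile (fun x => x == h)).length : Int)) < k
      · rw [if_pos hc]; exact List.mem_cons_of_mem _ this
      · rwa [if_neg hc]


-- membership in the run scan of a ≤-sorted list = membership with multiplicity below k
theorem mem_keptRuns (k : Int) (s : List Int) (hs : s.Pairwise (· ≤ ·)) : ∀ (w : Int),
    w ∈ keptRuns k s ↔ w ∈ s ∧ ((s.count w : Int) < k) := by
  induction s using keptRuns.induct k with
  | case1 => simp [keptRuns]
  | case2 h t run rest hlt ih =>
    exact keptRuns_cons_iff k h t hs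
      (ih (List.Pairwise.sublist (List.dropWhile_sublist _) (List.pairwise_cons.mp hs).2))
  | case3 h t run rest hnlt ih =>
    exact keptRuns_cons_iff k h t hs
      (ih (List.Pairwise.sublist (List.dropWhile_sublist _) (List.pairwise_cons.mp hs).2))

-- ===== VERDICT =====
theorem clear_watches_id_list_from_watches_for_all_users_py_spec : Claim_equal_clear_watches_id_list_from_watches_for_all_users_py := by
  intro chosen xs _
  unfold Spec_clear_watches_id_list_from_watches_for_all_users_py
  unfold clear_watches_id_list_from_watches_for_all_users_py
  unfold clear_watches_id_list_from_watches_for_all_users_py_alt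
  dsimp only []
  rw [PySem.List.foldl_append_ite_eq_filter, List.nil_append]
  congr 1
  apply List.filter_congr
  intro x hx
  have hpw : (PySem.List.sorted xs (fun x => x) false).Pairwise (· ≤ ·) := by
    simpa using PySem.List.sorted_pairwise (xs := xs) (key := fun x => x)
  have hxm : x ∈ PySem.List.sorted xs (fun x => x) false :=
    (PySem.List.mem_sorted xs (fun x => x) false x).mpr hx
  have hc : (PySem.List.sorted xs (fun x => x) false).count x = xs.count x :=
    (PySem.List.sorted_perm xs (fun x => x) false).count_eq x
  have hmk := mem_keptRuns (chosen.length) (PySem.List.sorted xs (fun x => x) false) hpw x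
  rw [PySem.List.count_eq]
  have : (keptRuns (chosen.length : Int) (PySem.List.sorted xs (fun x => x) false)).contains x
      = decide ((List.count x xs : Int) < (chosen.length : Int)) := by
    rw [Bool.eq_iff_iff]
    simp only [List.contains_iff_mem, decide_eq_true_eq, hmk, hxm, hc, true_and]
  rw [this]
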